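-- pv_equiv track=rewrite | github.com/rushilbhat/parallelism-experiments | estimates.py | enumerate_bucket_caps
-- ===== SOURCE A (Python) =====
-- from typing import Dict, Union, List, Tuple
-- import math
--
-- def create_buckets(all_params: List[Tuple[str, Tuple[int, ...]]], bucket_cap: int) -> List[List[Tuple[str, Tuple[int, ...]]]]:
--     non_zero_params = [(name, param) for name, param in all_params if param != (0,)]
--     buckets = [[]]
--     for name, param in reversed(non_zero_params):
--         if sum(math.prod(dim)*4 for _, dim in buckets[-1]) < bucket_cap:
--             buckets[-1].append((name, param))
--         else:
--             buckets.append([(name, param)])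
--
--     return buckets #in order of backward pass
--
-- def enumerate_bucket_caps(all_params: List[Tuple[str, Tuple[int, ...]]]) -> List[int]:
--     bucket_caps = [min(math.prod(p) for _, p in all_params if p != (0,)) * 4]
--     model_size = sum(math.prod(p) for _, p in all_params) * 4
--
--     while bucket_caps[-1] < model_size:
--         buckets = create_buckets(all_params, bucket_caps[-1]+4)
--         bucket_sizes = [sum(math.prod(p) for _, p in bucket) * 4 for bucket in buckets]
--         #case 1: more than 1 bucket, smallest bucket isn't last / case 2: more than 1 bucket, smallest bucket is last / case 3: only 1 bucket
--         next_cap = min(bucket_sizes[:-1] if len(bucket_sizes) > 1 and bucket_sizes.index(min(bucket_sizes)) == len(bucket_sizes)-1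
--                       else bucket_sizes)
--         bucket_caps.append(next_cap)
--
--     return bucket_caps
-- ===== SOURCE B (Python) =====
-- import math
--
-- def enumerate_bucket_caps(all_params):
--     prods = [math.prod(p) for _, p in all_params if p != (0,)]
--     bucket_caps = [min(prods) * 4]
--     model_size = sum(math.prod(p) for _, p in all_params) * 4
--     rev_sizes = [4 * p for p in reversed(prods)]
--
--     while bucket_caps[-1] < model_size:
--         thresh = bucket_caps[-1] + 4
--         running, closed_min = 0, None
--         for s in rev_sizes:
--             if running < thresh:
--                 running += s
--             else:
--                 closed_min = running if closed_min is None else min(closed_min, running)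
--                 running = s
--         bucket_caps.append(running if closed_min is None else closed_min)
--
--     return bucket_caps
-- ===== Notes on version B (the rewrite author's own statement) =====
-- stated objective: alternative
-- what changed: B precomputes the per-parameter sizes once and replaces A's per-iteration rebuilding of explicit bucket lists (with a fresh sum over the current bucket at every append) and the min/index-of-min scan by a single pass per iteration that keeps only a running bucket sum and the minimum closed-bucket size, using the identity that A's min(sizes[:-1] if ... else sizes) is always the minimum over the non-last buckets (or the single bucket's size).
import Mathlib
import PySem

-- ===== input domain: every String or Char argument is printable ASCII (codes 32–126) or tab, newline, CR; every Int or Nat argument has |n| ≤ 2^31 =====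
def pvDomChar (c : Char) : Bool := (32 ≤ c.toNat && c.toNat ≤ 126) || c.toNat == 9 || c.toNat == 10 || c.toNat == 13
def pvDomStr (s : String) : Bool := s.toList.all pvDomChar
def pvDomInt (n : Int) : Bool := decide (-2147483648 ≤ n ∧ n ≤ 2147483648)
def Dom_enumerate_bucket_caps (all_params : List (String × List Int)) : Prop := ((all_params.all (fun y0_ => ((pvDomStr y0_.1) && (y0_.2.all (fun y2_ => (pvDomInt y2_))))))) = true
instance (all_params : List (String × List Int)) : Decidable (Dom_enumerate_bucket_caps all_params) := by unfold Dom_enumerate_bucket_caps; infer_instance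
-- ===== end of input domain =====

-- B replaces A's per-iteration rebuilding of explicit bucket lists and the subsequent
-- min/index-of-min search by one pass over precomputed sizes keeping only the pair
-- (running, closed_min); same return value.

-- ===== PORT A =====

-- math.prod(p)
def pvProd (l : List Int) : Int := l.foldl (· * ·) 1

-- sum(math.prod(dim)*4 for _, dim in bucket)
def pvA_lastSum (b : List (String × List Int)) : Int :=
  (b.map (fun np => pvProd np.2 * 4)).sum

-- body of create_buckets' for-loop: append to buckets[-1] or start a new bucket
def pvA_place (bucket_cap : Int) (buckets : List (List (String × List Int)))
    (np : String × List Int) : List (List (String × List Int)) :=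
  if pvA_lastSum (buckets.getLastD []) < bucket_cap then
    buckets.dropLast ++ [buckets.getLastD [] ++ [np]]   -- buckets[-1].append(...)
  else
    buckets ++ [[np]]

-- create_buckets: the for-loop over reversed(non_zero_params) as a foldl
def pvA_createBuckets (all_params : List (String × List Int)) (bucket_cap : Int) :
    List (List (String × List Int)) :=
  let non_zero_params := all_params.filter (fun np => np.2 ≠ [0])
  non_zero_params.reverse.foldl (pvA_place bucket_cap) [[]]

-- the bucket_sizes list and the min(... if ... else ...) expression of A's loop body
def pvA_sizesMin (buckets : List (List (String × List Int))) : Int :=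
  let bucket_sizes := buckets.map (fun b => (b.map (fun np => pvProd np.2)).sum * 4)
  -- min(bucket_sizes); bucket_sizes is nonempty here, so getD 0 is never used
  let m := (PySem.List.min? bucket_sizes (fun x => x)).getD 0
  -- bucket_sizes[:-1] is dropLast (PySem.List.slice_to_neg_one)
  let cand := if bucket_sizes.length > 1 ∧
      PySem.List.index? bucket_sizes m = some (bucket_sizes.length - 1)
    then bucket_sizes.dropLast else bucket_sizes
  (PySem.List.min? cand (fun x => x)).getD 0

-- one body of A's while loop: the next cap appended to bucket_caps
def pvA_next (all_params : List (String × List Int)) (cap : Int) : Int :=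
  pvA_sizesMin (pvA_createBuckets all_params (cap + 4))

-- the while loop (fuel is a totality guard only; under Pre_ the cap strictly grows by ≥ 4
-- per iteration and is bounded by model_size, so the chosen fuel is never exhausted)
def pvA_loop (all_params : List (String × List Int)) (model_size : Int) :
    Nat → List Int → List Int
  | 0, bucket_caps => bucket_caps
  | fuel + 1, bucket_caps =>
    if bucket_caps.getLastD 0 < model_size then
      pvA_loop all_params model_size fuel
        (bucket_caps ++ [pvA_next all_params (bucket_caps.getLastD 0)])
    else bucket_caps

def enumerate_bucket_caps (all_params : List (String × List Int)) : List Int :=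
  let nzprods := (all_params.filter (fun np => np.2 ≠ [0])).map (fun np => pvProd np.2)
  match PySem.List.min? nzprods (fun x => x) with
  | none => []   -- Python raises ValueError (min of empty); excluded by Pre_
  | some m0 =>
    let model_size := (all_params.map (fun np => pvProd np.2)).sum * 4
    pvA_loop all_params model_size ((model_size - m0 * 4).toNat + 1) [m0 * 4]

-- ===== PORT B =====

-- one step of B's inner for-loop over rev_sizes, state (running, closed_min)
def pvB_step (thresh : Int) (st : Int × Option Int) (s : Int) : Int × Option Int :=
  if st.1 < thresh then (st.1 + s, st.2)
  else (s, some (match st.2 with | none => st.1 | some v => min v st.1))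

-- one body of B's while loop
def pvB_next (rev_sizes : List Int) (cap : Int) : Int :=
  let st := rev_sizes.foldl (pvB_step (cap + 4)) (0, none)
  match st.2 with | none => st.1 | some v => v

def pvB_loop (rev_sizes : List Int) (model_size : Int) :
    Nat → List Int → List Int
  | 0, bucket_caps => bucket_caps
  | fuel + 1, bucket_caps =>
    if bucket_caps.getLastD 0 < model_size then
      pvB_loop rev_sizes model_size fuel
        (bucket_caps ++ [pvB_next rev_sizes (bucket_caps.getLastD 0)])
    else bucket_caps

def enumerate_bucket_caps_alt (all_params : List (String × List Int)) : List Int :=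
  let prods := (all_params.filter (fun np => np.2 ≠ [0])).map (fun np => pvProd np.2)
  match PySem.List.min? prods (fun x => x) with
  | none => []   -- Python raises ValueError (min of empty); excluded by Pre_
  | some m0 =>
    let model_size := (all_params.map (fun np => pvProd np.2)).sum * 4
    let rev_sizes := prods.reverse.map (fun p => 4 * p)
    pvB_loop rev_sizes model_size ((model_size - m0 * 4).toNat + 1) [m0 * 4]

-- ===== PRECONDITION & SPEC =====

-- Pre_ excludes exactly the inputs with no parameter other than (0,): there Python's
-- min() of an empty sequence raises ValueError in A and in B alike.
def Pre_enumerate_bucket_caps (all_params : List (String × List Int)) : Prop :=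
  ∃ np ∈ all_params, np.2 ≠ [0]
instance (all_params : List (String × List Int)) : Decidable (Pre_enumerate_bucket_caps all_params) := by unfold Pre_enumerate_bucket_caps; infer_instance

def pvWitness_enumerate_bucket_caps : (List (String × List Int)) := [("w", [2]), ("b", [3, 1])]

def Spec_enumerate_bucket_caps (all_params : List (String × List Int)) (out : List Int) : Prop := out = enumerate_bucket_caps_alt all_params
instance (all_params : List (String × List Int)) (out : List Int) : Decidable (Spec_enumerate_bucket_caps all_params out) := by unfold Spec_enumerate_bucket_caps; infer_instance

-- ===== CLAIM (what is proved, stated in full; the proofs are below) =====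
def Claim_equal_enumerate_bucket_caps : Prop := ∀ (all_params : List (String × List Int)), Dom_enumerate_bucket_caps all_params → Pre_enumerate_bucket_caps all_params → Spec_enumerate_bucket_caps all_params (enumerate_bucket_caps all_params)

-- ===== LEMMAS AND PROOFS =====

-- closed_min as a fold (the running minimum B maintains), for stating the invariant
def pvCMin (l : List Int) : Option Int :=
  l.foldl (fun acc v => some (match acc with | none => v | some w => min w v)) none

theorem pvCMin_some (l : List Int) (w : Int) :
    l.foldl (fun acc v => some (match acc with | none => v | some w => min w v)) (some w)
      = some (l.foldl min w) := by
  induction l generalizing w with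
  | nil => rfl
  | cons x t ih => simpa using ih (min w x)

theorem pvCMin_cons (c : Int) (l : List Int) : pvCMin (c :: l) = some (l.foldl min c) := by
  simpa [pvCMin] using pvCMin_some l c

theorem pvCMin_concat (l : List Int) (v : Int) :
    pvCMin (l ++ [v]) = some (match pvCMin l with | none => v | some w => min w v) := by
  simp [pvCMin, List.foldl_append]

-- (sum of prods) * 4 of a bucket = sum of (prod*4) of the bucket
theorem pvSz_bridge (b : List (String × List Int)) :
    (b.map (fun np => pvProd np.2)).sum * 4 = pvA_lastSum b := by
  induction b with
  | nil => simp [pvA_lastSum]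
  | cons np t ih => simp [pvA_lastSum, List.sum_cons, add_mul] at ih ⊢; omega

-- A's min(bucket_sizes[:-1] if len>1 and index(min)==len-1 else bucket_sizes)
-- is the minimum of the non-last bucket sizes (or the last size if it is alone).
theorem pvSizesMin_eq (cs : List (List (String × List Int)))
    (b : List (String × List Int)) :
    pvA_sizesMin (cs ++ [b])
      = (match pvCMin (cs.map pvA_lastSum) with | none => pvA_lastSum b | some v => v) := by
  unfold pvA_sizesMin
  rw [List.map_append]
  simp only [List.map_cons, List.map_nil, pvSz_bridge]
  set l := cs.map pvA_lastSum with hl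
  set x := pvA_lastSum b with hx
  clear_value l x
  cases l with
  | nil => simp [pvCMin, PySem.List.min?_id_cons]
  | cons c cs' =>
    rw [pvCMin_cons]
    set M := cs'.foldl min c with hM
    have hMle := PySem.List.foldl_min_le cs' c
    have hMmem : M ∈ c :: cs' := by
      rcases PySem.List.foldl_min_mem cs' c with h | h
      · exact h ▸ List.mem_cons_self
      · exact List.mem_cons_of_mem _ h
    have hmin : PySem.List.min? ((c :: cs') ++ [x]) (fun x => x) = some (min M x) := by
      rw [List.cons_append, PySem.List.min?_id_cons, List.foldl_append]
      simp [hM]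
    have hlen : ((c :: cs') ++ [x]).length > 1 := by simp
    by_cases hxlt : x < M
    · -- last element is the unique minimum: it is dropped, answer is M
      have hmx : min M x = x := by omega
      have hnotin : x ∉ c :: cs' := by
        intro hmem
        rcases List.mem_cons.mp hmem with heq | hmem'
        · omega
        · exact absurd (hMle.2 _ hmem') (by omega)
      have hidx : PySem.List.index? ((c :: cs') ++ [x]) x = some (c :: cs').length :=
        PySem.List.index?_append_singleton_self _ x hnotin
      simp only [hmin, hmx, Option.getD_some, hidx]
      rw [if_pos ⟨hlen, by simp⟩, List.dropLast_concat]
      simp [PySem.List.min?_id_cons, hM]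
    · -- minimum occurs among the non-last sizes: answer is M either way
      have hmx : min M x = M := by omega
      have hcond : ¬ (((c :: cs') ++ [x]).length > 1 ∧
          PySem.List.index? ((c :: cs') ++ [x]) M = some (((c :: cs') ++ [x]).length - 1)) := by
        rintro ⟨-, hidx⟩
        rw [PySem.List.index?_append_of_mem _ hMmem] at hidx
        obtain ⟨hk, -, -⟩ := PySem.List.getElem_of_index?_eq_some hidx
        simp at hk
      simp only [hmin, Option.getD_some, hmx]
      rw [if_neg hcond, hmin]
      simpa using hmx

theorem pvA_fold_ne_nil (th : Int) (L : List (String × List Int))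
    (s : List (List (String × List Int))) (hs : s ≠ []) :
    L.foldl (pvA_place th) s ≠ [] := by
  induction L generalizing s with
  | nil => exact hs
  | cons np t ih =>
    rw [List.foldl_cons]
    unfold pvA_place
    split <;> exact ih _ (by simp)

-- The bucket-building fold and B's (running, closed_min) fold walk in lockstep:
-- running tracks the last bucket's size, closed_min the minimum closed-bucket size.
theorem pvA_fold_inv (th : Int) (L : List (String × List Int)) :
    ∀ (cs : List (List (String × List Int))) (b : List (String × List Int)),
    (L.map (fun np => pvProd np.2 * 4)).foldl (pvB_step th)
        (pvA_lastSum b, pvCMin (cs.map pvA_lastSum))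
      = (pvA_lastSum ((L.foldl (pvA_place th) (cs ++ [b])).getLastD []),
         pvCMin (((L.foldl (pvA_place th) (cs ++ [b])).dropLast).map pvA_lastSum)) := by
  induction L with
  | nil => intro cs b; simp
  | cons np t ih =>
    intro cs b
    simp only [List.map_cons, List.foldl_cons, pvA_place, List.getLastD_concat,
      List.dropLast_concat, pvB_step]
    by_cases h : pvA_lastSum b < th
    · rw [if_pos h, if_pos h]
      have hlast : pvA_lastSum (b ++ [np]) = pvA_lastSum b + pvProd np.2 * 4 := by
        simp [pvA_lastSum]
      simpa [hlast] using ih cs (b ++ [np])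
    · rw [if_neg h, if_neg h]
      have hone : pvA_lastSum [np] = pvProd np.2 * 4 := by simp [pvA_lastSum]
      have := ih (cs ++ [b]) [np]
      rw [List.append_assoc] at this
      simpa [hone, pvCMin_concat] using this

-- per-iteration agreement: A's next cap = B's next cap
theorem pvNext_eq (all_params : List (String × List Int)) (cap : Int) (rs : List Int)
    (hrs : rs = ((all_params.filter (fun np => np.2 ≠ [0])).reverse).map
      (fun np => pvProd np.2 * 4)) :
    pvA_next all_params cap = pvB_next rs cap := by
  subst hrs
  rw [pvA_next, pvA_createBuckets, pvB_next]
  set nzr := (all_params.filter (fun np => np.2 ≠ [0])).reverse with hnzr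
  have hinv := pvA_fold_inv (cap + 4) nzr [] []
  simp only [List.nil_append, List.map_nil] at hinv
  have hA0 : pvA_lastSum ([] : List (String × List Int)) = 0 := by simp [pvA_lastSum]
  have hC0 : pvCMin [] = none := rfl
  rw [hA0, hC0] at hinv
  set res := nzr.foldl (pvA_place (cap + 4)) [[]] with hres
  have hne : res ≠ [] := pvA_fold_ne_nil _ _ _ (by simp)
  have hsplit : res.dropLast ++ [res.getLastD []] = res := by
    rw [List.getLastD_eq_getLast?, List.getLast?_eq_some_getLast hne]
    simp [List.dropLast_concat_getLast]
  rw [hinv, ← hsplit, pvSizesMin_eq]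
  simp

theorem pvLoop_eq (all_params : List (String × List Int)) (ms : Int) (rs : List Int)
    (hrs : rs = ((all_params.filter (fun np => np.2 ≠ [0])).reverse).map
      (fun np => pvProd np.2 * 4)) (fuel : Nat) :
    ∀ caps, pvA_loop all_params ms fuel caps = pvB_loop rs ms fuel caps := by
  induction fuel with
  | zero => intro caps; rfl
  | succ f ih =>
    intro caps
    rw [pvA_loop, pvB_loop]
    split
    · rw [pvNext_eq all_params _ rs hrs, ih]
    · rfl

-- ===== VERDICT (by name: the statement is the Claim_ definition above) =====
theorem enumerate_bucket_caps_spec : Claim_equal_enumerate_bucket_caps := by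
  intro all_params _ _
  show enumerate_bucket_caps all_params = enumerate_bucket_caps_alt all_params
  simp only [enumerate_bucket_caps, enumerate_bucket_caps_alt]
  cases hm : PySem.List.min? ((all_params.filter (fun np => np.2 ≠ [0])).map
      (fun np => pvProd np.2)) (fun x => x) with
  | none => rfl
  | some m0 =>
    exact pvLoop_eq all_params _ _ (by simp [List.map_reverse, Function.comp_def, mul_comm]) _ _
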